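-- pv_equiv track=rewrite | github.com/diyaraj2028-code/chicago-airbnb-data | report.py | count_listings_by_host_count
-- ===== SOURCE A (Python) =====
-- INDEX_HOST_ID = 2
--
-- def count_listings_by_host_count(data: list[list[str]]) -> list[int]:
--     """Creates a list containing the number of listings by hosts of a fixed number of listings
--
--     Concretely, this list is organized where each index 'i+1' contains the
--       number of listings by hosts with exactly 'i+1' listings, up to 9 listings
--     Additionally, the 9th index of this list contains the number of
--       listings by hosts with _at least_ 10 listings
--     A host is uniquely identified by their HOST ID
--
--     For example, if we have lst = count_listings_by_host_count(data)
--       then lst[0] is how many listings are by hosts with exactly 1 listing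
--       and  lst[4] is how many listings are by hosts with exactly 5 listings
--       and  lst[9] is how many listings are by hosts with at least 10 listings
--
--     Arguments:
--       data: an Inside Airbnb dataset
--
--     Returns:
--       a list of how many listings are listed for every host providing i listings
--     """
--     listing_counts = [0] * 10
--     host_listings = {}
--     for host in data:
--         host_id = host[INDEX_HOST_ID]
--         if (host_id not in host_listings):
--             host_id_count = 1
--             host_listings.update([(host_id, host_id_count)])
--         elif (host_id in host_listings):
--             host_listings[host_id] += 1
--     for value in host_listings.values():
--         if value > 9:
--             listing_counts[9] += value
--         else:
--             for i in range(len(listing_counts)):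
--                 if (value - 1) == i:
--                     listing_counts[i] += value
--     return listing_counts
-- ===== SOURCE B (Python) =====
-- INDEX_HOST_ID = 2
--
-- def count_listings_by_host_count(data: list[list[str]]) -> list[int]:
--     """Count listings grouped by the host's total listing count.
--
--     Same result as A: per-host counts first, then per-bucket tallies computed
--     directly -- bucket i (i<9) is (i+1) times the number of hosts with exactly
--     i+1 listings; the last bucket sums the counts of hosts with >= 10 listings.
--     """
--     hosts = {}
--     for row in data:
--         h = row[INDEX_HOST_ID]
--         hosts[h] = hosts.get(h, 0) + 1
--     values = list(hosts.values())
--     result = [(i + 1) * values.count(i + 1) for i in range(9)]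
--     result.append(sum(v for v in values if v >= 10))
--     return result
-- ===== Notes on version B (the rewrite author's own statement) =====
-- stated objective: simpler
-- what changed: The per-host bucket-dispatch second pass (for each host value, an inner scan over all 10 indices to find value-1) is replaced by computing each bucket directly: bucket i is (i+1)*values.count(i+1) and the last bucket is a single filtered sum; the first pass becomes a plain get-based counter instead of the contains/update/in-place-increment branching.
import Mathlib
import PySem

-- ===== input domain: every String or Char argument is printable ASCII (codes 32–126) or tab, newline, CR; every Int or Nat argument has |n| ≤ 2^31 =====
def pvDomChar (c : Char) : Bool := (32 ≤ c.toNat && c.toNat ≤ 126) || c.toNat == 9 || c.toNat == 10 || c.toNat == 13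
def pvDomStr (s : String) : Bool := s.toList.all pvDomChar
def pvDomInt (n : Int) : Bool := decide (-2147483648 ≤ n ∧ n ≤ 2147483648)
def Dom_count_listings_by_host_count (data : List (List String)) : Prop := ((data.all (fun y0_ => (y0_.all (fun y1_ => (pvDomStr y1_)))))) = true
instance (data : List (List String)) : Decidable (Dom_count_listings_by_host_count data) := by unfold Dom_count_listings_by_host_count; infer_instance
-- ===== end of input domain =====

-- B replaces A's per-host bucket dispatch (an inner scan over the 10 indices per host)
-- by computing each bucket directly from the host-count values; objective: simpler.

-- ===== PORT A =====
def count_listings_by_host_count (data : List (List String)) : List Int :=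
  let listing_counts : List Int := List.replicate 10 0
  let host_listings : PySem.Dict String Int :=
    data.foldl (fun d host =>
      let host_id := (PySem.List.pyGet? host 2).getD ""   -- host[INDEX_HOST_ID]; total via getD, Pre_ keeps the index in range
      if ¬ d.contains host_id then d.update [(host_id, 1)]
      else if d.contains host_id then d.modify host_id 0 (· + 1)
      else d) PySem.Dict.empty
  host_listings.values.foldl (fun counts value =>
    if value > 9 then counts.set 9 (counts.getD 9 0 + value)
    else (PySem.List.pyRange 0 (counts.length : Int) 1).foldl
      (fun acc i => if value - 1 = i then acc.set i.toNat (acc.getD i.toNat 0 + value) else acc)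
      counts) listing_counts

-- ===== PORT B =====
def count_listings_by_host_count_alt (data : List (List String)) : List Int :=
  let hosts : PySem.Dict String Int :=
    data.foldl (fun d row =>
      let h := (PySem.List.pyGet? row 2).getD ""          -- row[INDEX_HOST_ID]; total via getD, Pre_ keeps the index in range
      d.insert h (d.getD h 0 + 1)) PySem.Dict.empty
  let values := hosts.values
  let result := (PySem.List.pyRange 0 9 1).map (fun i => (i + 1) * (PySem.List.count values (i + 1) : Int))
  result ++ [values.foldl (fun s v => if 10 ≤ v then s + v else s) 0]

-- ===== PRECONDITION & SPEC =====
-- Pre_ excludes exactly the inputs where A raises IndexError: a row with fewer than 3 fields.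
def Pre_count_listings_by_host_count (data : List (List String)) : Prop :=
  ∀ row ∈ data, 3 ≤ row.length
instance (data : List (List String)) : Decidable (Pre_count_listings_by_host_count data) := by
  unfold Pre_count_listings_by_host_count; infer_instance
def pvWitness_count_listings_by_host_count : List (List String) :=
  [["1", "x", "h1"], ["2", "y", "h2"], ["3", "z", "h1"]]

def Spec_count_listings_by_host_count (data : List (List String)) (out : List Int) : Prop := out = count_listings_by_host_count_alt data
instance (data : List (List String)) (out : List Int) : Decidable (Spec_count_listings_by_host_count data out) := by unfold Spec_count_listings_by_host_count; infer_instance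

-- ===== CLAIM (what is proved, stated in full; the proofs are below) =====
def Claim_equal_count_listings_by_host_count : Prop := ∀ (data : List (List String)), Dom_count_listings_by_host_count data → Pre_count_listings_by_host_count data → Spec_count_listings_by_host_count data (count_listings_by_host_count data)

-- ===== LEMMAS AND PROOFS =====

-- A's phase-2 loop body, named for the proofs (defeq to the lambda in the port)
def pvStepA (counts : List Int) (value : Int) : List Int :=
  if value > 9 then counts.set 9 (counts.getD 9 0 + value)
  else (PySem.List.pyRange 0 (counts.length : Int) 1).foldl
    (fun acc i => if value - 1 = i then acc.set i.toNat (acc.getD i.toNat 0 + value) else acc)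
    counts

-- the contribution of the host-count multiset vs to bucket j
def pvContrib (vs : List Int) (j : Nat) : Int :=
  if j = 9 then (vs.filter (fun v => decide (10 ≤ v))).sum
  else ((j : Int) + 1) * (vs.count ((j : Int) + 1) : Int)

theorem pvFilterRange (v : Int) :
    List.filter (fun x => decide (v - 1 = x)) ([0,1,2,3,4,5,6,7,8,9] : List Int)
      = if 1 ≤ v ∧ v ≤ 10 then [v - 1] else [] := by
  by_cases h : 1 ≤ v ∧ v ≤ 10
  · rw [if_pos h]
    obtain ⟨h1, h2⟩ := h
    interval_cases v <;> decide
  · rw [if_neg h, List.filter_eq_nil_iff]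
    intro a ha
    simp only [decide_eq_true_eq]
    fin_cases ha <;> omega

theorem pvGetDSet (c : List Int) (n j : Nat) (v : Int) (hn : n < c.length) (hj : j < c.length) :
    (c.set n (c.getD n 0 + v)).getD j 0 = c.getD j 0 + if n = j then v else 0 := by
  rw [List.getD_eq_getElem _ _ (by simpa using hj), List.getElem_set]
  split_ifs with h
  · subst h; rw [List.getD_eq_getElem _ _ hn]
  · rw [List.getD_eq_getElem _ _ hj]; ring

theorem pvStepA_length (c : List Int) (v : Int) (hc : c.length = 10) :
    (pvStepA c v).length = 10 := by
  unfold pvStepA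
  rw [hc]
  split
  · simp [hc]
  · rw [show ((10:Nat):Int) = (10:Int) by norm_num,
        show PySem.List.pyRange 0 (10:Int) 1 = [0,1,2,3,4,5,6,7,8,9] from by decide,
        PySem.List.foldl_ite_eq_foldl_filter, pvFilterRange]
    split
    · simp [hc]
    · exact hc

theorem pvStepA_getD (c : List Int) (v : Int) (hc : c.length = 10) (j : Nat) (hj : j < 10) :
    (pvStepA c v).getD j 0 = c.getD j 0 +
      (if j = 9 then (if 10 ≤ v then v else 0) else (if v = (j : Int) + 1 then v else 0)) := by
  unfold pvStepA
  rw [hc]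
  split
  · rename_i hv
    rw [pvGetDSet c 9 j v (by omega) (by omega)]
    split_ifs <;> omega
  · rename_i hv
    rw [show ((10:Nat):Int) = (10:Int) by norm_num,
        show PySem.List.pyRange 0 (10:Int) 1 = [0,1,2,3,4,5,6,7,8,9] from by decide,
        PySem.List.foldl_ite_eq_foldl_filter, pvFilterRange]
    split
    · rename_i h
      obtain ⟨h1, h2⟩ := h
      simp only [List.foldl_cons, List.foldl_nil]
      rw [pvGetDSet c (v-1).toNat j v (by omega) (by omega)]
      split_ifs <;> omega
    · rename_i h
      simp only [List.foldl_nil]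
      split_ifs <;> omega

theorem pvContrib_cons (v : Int) (vs : List Int) (j : Nat) :
    pvContrib (v :: vs) j = pvContrib vs j +
      (if j = 9 then (if 10 ≤ v then v else 0) else (if v = (j : Int) + 1 then v else 0)) := by
  unfold pvContrib
  by_cases h9 : j = 9
  · simp only [h9, List.filter_cons]
    by_cases h : 10 ≤ v
    · simp only [h, decide_true, if_pos, List.sum_cons]; ring
    · simp [h]
  · simp only [if_neg h9, List.count_cons]
    by_cases h : v = (j : Int) + 1
    · subst h
      simp only [beq_self_eq_true, if_pos]
      push_cast; ring
    · simp [h]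

theorem pvContrib_nil (j : Nat) : pvContrib [] j = 0 := by
  unfold pvContrib; split <;> simp

theorem pvPhase2 (vs : List Int) (c : List Int) (hc : c.length = 10) :
    vs.foldl pvStepA c = (List.range 10).map (fun j => c.getD j 0 + pvContrib vs j) := by
  induction vs generalizing c with
  | nil =>
    simp only [List.foldl_nil, pvContrib_nil, add_zero]
    apply List.ext_getElem
    · simp [hc]
    · intro i h1 h2
      simp only [List.getElem_map, List.getElem_range]
      rw [List.getD_eq_getElem _ _ (by omega)]
  | cons v vs ih =>
    rw [List.foldl_cons, ih (pvStepA c v) (pvStepA_length c v hc)]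
    apply List.map_congr_left
    intro j hj
    rw [pvStepA_getD c v hc j (List.mem_range.mp hj), pvContrib_cons]
    ring

theorem pvPhase1 (data : List (List String)) :
    data.foldl (fun (d : PySem.Dict String Int) host =>
      let host_id := (PySem.List.pyGet? host 2).getD ""
      if ¬ d.contains host_id then d.update [(host_id, 1)]
      else if d.contains host_id then d.modify host_id 0 (· + 1)
      else d) PySem.Dict.empty
    = data.foldl (fun (d : PySem.Dict String Int) row =>
      let h := (PySem.List.pyGet? row 2).getD ""
      d.insert h (d.getD h 0 + 1)) PySem.Dict.empty := by
  apply PySem.List.foldl_congr_mem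
  intro d host _
  dsimp only
  by_cases hc : d.contains ((PySem.List.pyGet? host 2).getD "")
  · rw [if_neg (by simp [hc]), if_pos hc]
    rfl
  · rw [if_pos (by simp [hc])]
    have h0 : d.getD ((PySem.List.pyGet? host 2).getD "") 0 = 0 := by
      unfold PySem.Dict.getD
      rw [(PySem.Dict.get?_eq_none_iff_contains d _).mpr (by simpa using hc)]
      rfl
    show d.insert ((PySem.List.pyGet? host 2).getD "") 1 = _
    rw [h0]
    norm_num

theorem pvTarget (vs : List Int) :
    (List.range 10).map (pvContrib vs)
      = (PySem.List.pyRange 0 9 1).map (fun i => (i + 1) * (PySem.List.count vs (i + 1) : Int))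
        ++ [vs.foldl (fun s v => if 10 ≤ v then s + v else s) 0] := by
  have h1 : (List.range 9).map (pvContrib vs)
      = (PySem.List.pyRange 0 9 1).map (fun i => (i + 1) * (PySem.List.count vs (i + 1) : Int)) := by
    rw [show PySem.List.pyRange 0 9 1 = PySem.List.pyRange 0 ((9:Nat):Int) 1 by norm_num,
        PySem.List.pyRange_zero_natCast, List.map_map]
    apply List.map_congr_left
    intro j hj
    have hne : j ≠ 9 := by have := List.mem_range.mp hj; omega
    simp only [Function.comp, pvContrib, if_neg hne, PySem.List.count_eq]
  have h2 : (pvContrib vs) 9 = vs.foldl (fun s v => if 10 ≤ v then s + v else s) 0 := by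
    simp only [pvContrib]
    rw [PySem.List.foldl_ite_eq_foldl_filter (p := fun v => 10 ≤ v) (f := fun s v => s + v),
        PySem.List.foldl_add _ (fun x => x) 0]
    simp [List.map_id_fun']
  rw [show (10:Nat) = 9 + 1 from rfl, List.range_succ, List.map_append, h1,
      List.map_cons, List.map_nil, h2]

-- A's phase 2 from the all-zero table equals B's direct per-bucket computation
theorem pvMain (vs : List Int) :
    vs.foldl (fun counts value =>
      if value > 9 then counts.set 9 (counts.getD 9 0 + value)
      else (PySem.List.pyRange 0 (counts.length : Int) 1).foldl
        (fun acc i => if value - 1 = i then acc.set i.toNat (acc.getD i.toNat 0 + value) else acc)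
        counts) (List.replicate 10 0)
    = (PySem.List.pyRange 0 9 1).map (fun i => (i + 1) * (PySem.List.count vs (i + 1) : Int))
        ++ [vs.foldl (fun s v => if 10 ≤ v then s + v else s) 0] := by
  rw [show (fun counts value =>
      if value > 9 then counts.set 9 (counts.getD 9 0 + value)
      else (PySem.List.pyRange 0 (counts.length : Int) 1).foldl
        (fun acc i => if value - 1 = i then acc.set i.toNat (acc.getD i.toNat 0 + value) else acc)
        counts) = pvStepA from rfl,
      pvPhase2 vs (List.replicate 10 0) (by simp), ← pvTarget]
  apply List.map_congr_left
  intro j hj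
  have hj10 := List.mem_range.mp hj
  rw [List.getD_eq_getElem _ _ (by simpa using hj10), List.getElem_replicate]
  ring

-- ===== VERDICT (by name: the statement is the Claim_ definition above) =====
theorem count_listings_by_host_count_spec : Claim_equal_count_listings_by_host_count := by
  intro data _ _
  unfold Spec_count_listings_by_host_count count_listings_by_host_count count_listings_by_host_count_alt
  rw [pvPhase1]
  exact pvMain _
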